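-- pv_equiv track=rewrite | github.com/hon99oo/PythonAlgorithmStudy | BOJ/그리디/2785_체인/solution.py | solution
-- ===== SOURCE A (Python) =====
-- def solution(n, chains):
--     count = 0
--     chains.sort()
--     use_chain = 0
--     for chain in chains:
--         if chain == n - 1:
--             return use_chain + chain
--         elif chain > n - 1:
--             return use_chain + n - 1
--         else:
--             n -= (chain + 1)
--             use_chain += chain
--
--     return count
-- ===== SOURCE B (Python) =====
-- def solution(n, chains):
--     # Sort in place (same mutation as A), build a prefix-sum table, then
--     # binary-search the first stopping index; the answer collapses to n - idx - 1.
--     chains.sort()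
--     m = len(chains)
--     pref = [0]
--     for c in chains:
--         pref.append(pref[-1] + c)
--     lo, hi = 0, m
--     while lo < hi:
--         mid = (lo + hi) // 2
--         if chains[mid] + mid + pref[mid] >= n - 1:
--             hi = mid
--         else:
--             lo = mid + 1
--     return 0 if lo == m else n - lo - 1
-- ===== Notes on version B (the rewrite author's own statement) =====
-- stated objective: alternative
-- what changed: Replaces A's single state-threading scan (current n and use_chain updated per chain) by a prefix-sum table plus a binary search for the first stopping index i, at which the answer collapses to the closed form n - i - 1; cost is still dominated by the sort.
-- outside the precondition, e.g. on solution(-4, [-5, -3]): A returns -5, B returns 0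
import Mathlib
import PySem

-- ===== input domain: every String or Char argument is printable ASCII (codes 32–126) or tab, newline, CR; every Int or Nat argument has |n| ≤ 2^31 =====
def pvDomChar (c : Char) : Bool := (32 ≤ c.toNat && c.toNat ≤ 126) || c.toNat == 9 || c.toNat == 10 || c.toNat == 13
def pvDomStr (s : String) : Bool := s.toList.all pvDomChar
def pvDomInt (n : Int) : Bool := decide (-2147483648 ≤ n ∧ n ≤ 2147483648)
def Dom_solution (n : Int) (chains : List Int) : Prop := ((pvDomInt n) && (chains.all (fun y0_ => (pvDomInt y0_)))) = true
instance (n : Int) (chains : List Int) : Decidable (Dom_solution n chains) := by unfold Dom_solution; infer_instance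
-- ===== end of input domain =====

-- B replaces A's state-threading scan by a prefix table + binary search (no speed claim:
-- the sort dominates both); A sorts `chains` in place, B performs the same mutation, and
-- the equivalence proved here is about the return value.

-- ===== PORT A =====
def solutionLoop (n : Int) (use_chain : Int) : List Int → Int
  | [] => 0                                   -- falls off the loop: `return count` with count = 0
  | chain :: rest =>
    if chain = n - 1 then use_chain + chain
    else if chain > n - 1 then use_chain + n - 1
    else solutionLoop (n - (chain + 1)) (use_chain + chain) rest

def solution (n : Int) (chains : List Int) : Int :=
  solutionLoop n 0 (PySem.List.sorted chains (fun x => x) false)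

-- ===== PORT B =====
-- pref = [0]; for c in chains: pref.append(pref[-1] + c)
def prefTable (chains : List Int) : List Int :=
  chains.foldl (fun p c => p ++ [p.getLast! + c]) [0]

-- the while-loop; lo, hi are nonnegative ints, (lo+hi)//2 = Nat division here;
-- chains[mid] / pref[mid] always have mid < length, so getD is exact
def bsearchLoop (n : Int) (s pref : List Int) (lo hi : Nat) : Nat :=
  if _h : lo < hi then
    -- mid = (lo + hi) // 2
    if s.getD ((lo + hi) / 2) 0 + (((lo + hi) / 2 : Nat) : Int) + pref.getD ((lo + hi) / 2) 0 ≥ n - 1 then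
      bsearchLoop n s pref lo ((lo + hi) / 2)
    else bsearchLoop n s pref ((lo + hi) / 2 + 1) hi
  else lo
termination_by hi - lo
decreasing_by all_goals omega

def solution_alt (n : Int) (chains : List Int) : Int :=
  let s := PySem.List.sorted chains (fun x => x) false
  let lo := bsearchLoop n s (prefTable s) 0 s.length
  if lo = s.length then 0 else n - (lo : Int) - 1

-- ===== PRECONDITION & SPEC =====
-- Pre_ restricts to the problem's natural domain of nonnegative chain lengths; A still
-- returns a value on negative entries, but B's binary search relies on the monotonicity
-- that nonnegative lengths provide, so those inputs are excluded.
def Pre_solution (n : Int) (chains : List Int) : Prop := ∀ c ∈ chains, 0 ≤ c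
instance (n : Int) (chains : List Int) : Decidable (Pre_solution n chains) := by unfold Pre_solution; infer_instance

def pvWitness_solution : Int × List Int := (5, [1, 2, 3])

def Spec_solution (n : Int) (chains : List Int) (out : Int) : Prop := out = solution_alt n chains
instance (n : Int) (chains : List Int) (out : Int) : Decidable (Spec_solution n chains out) := by unfold Spec_solution; infer_instance

-- ===== CLAIM (what is proved, stated in full; the proofs are below) =====
def Claim_equal_solution : Prop := ∀ (n : Int) (chains : List Int), Dom_solution n chains → Pre_solution n chains → Spec_solution n chains (solution n chains)

-- ===== LEMMAS AND PROOFS =====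

-- the stop predicate, phrased on take-sums
def stopAt (n : Int) (s : List Int) (j : Nat) : Prop :=
  s.getD j 0 + (j : Int) + (s.take j).sum ≥ n - 1

-- running partial sums starting from a
def partials (a : Int) : List Int → List Int
  | [] => []
  | c :: t => (a + c) :: partials (a + c) t

lemma foldl_pref (l : List Int) : ∀ (acc : List Int), acc ≠ [] →
    l.foldl (fun p c => p ++ [p.getLast! + c]) acc = acc ++ partials acc.getLast! l := by
  induction l with
  | nil => intro acc _; simp [partials]
  | cons c t ih =>
    intro acc hacc
    simp only [List.foldl_cons, partials]
    rw [ih (acc ++ [acc.getLast! + c]) (by simp)]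
    have hl : (acc ++ [acc.getLast! + c]).getLast! = acc.getLast! + c := by
      rw [List.getLast!_eq_getLast?_getD, List.getLast?_concat]
      rfl
    rw [hl, List.append_assoc]
    rfl

lemma partials_getD : ∀ (l : List Int) (a : Int) (i : Nat), i < l.length →
    (partials a l).getD i 0 = a + (l.take (i + 1)).sum := by
  intro l
  induction l with
  | nil => intro a i h; simp at h
  | cons c t ih =>
    intro a i h
    cases i with
    | zero => simp [partials]
    | succ j =>
      simp only [partials, List.getD_cons_succ, List.take_succ_cons, List.sum_cons]
      rw [ih (a + c) j (by simpa using h)]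
      ring

lemma prefTable_getD (s : List Int) (i : Nat) (h : i < s.length) :
    (prefTable s).getD i 0 = (s.take i).sum := by
  unfold prefTable
  rw [foldl_pref s [0] (by simp)]
  have hl : ([0] : List Int).getLast! = 0 := rfl
  rw [hl]
  cases i with
  | zero => simp
  | succ j =>
    have h2 : ((0 : Int) :: partials 0 s).getD (j + 1) 0 = (partials 0 s).getD j 0 :=
      List.getD_cons_succ
    simpa [h2] using partials_getD s 0 j (by omega)

lemma getD_eq_getElem (s : List Int) (i : Nat) (h : i < s.length) :
    s.getD i 0 = s[i] := by
  simp [List.getD, List.getElem?_eq_getElem h]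

lemma sum_take_succ_getD (s : List Int) (i : Nat) (h : i < s.length) :
    (s.take (i + 1)).sum = (s.take i).sum + s.getD i 0 := by
  rw [getD_eq_getElem s i h]
  simpa using List.sum_take_succ s i h

lemma stop_mono (n : Int) (s : List Int) (hnn : ∀ c ∈ s, 0 ≤ c) :
    ∀ i j : Nat, stopAt n s i → i ≤ j → j < s.length → stopAt n s j := by
  intro i j hi hij hj
  induction j with
  | zero => cases Nat.le_zero.mp hij; exact hi
  | succ k ih =>
    rcases Nat.lt_or_ge i (k + 1) with hlt | hge
    · have hk : stopAt n s k := ih (by omega) (by omega)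
      have hkl : k < s.length := by omega
      have hnext : 0 ≤ s.getD (k + 1) 0 := by
        rw [getD_eq_getElem s (k + 1) hj]; exact hnn _ (List.getElem_mem hj)
      unfold stopAt at hk ⊢
      rw [sum_take_succ_getD s k hkl]
      have hksk : 0 ≤ s.getD k 0 := by
        rw [getD_eq_getElem s k hkl]; exact hnn _ (List.getElem_mem hkl)
      push_cast at hk ⊢
      omega
    · have : i = k + 1 := by omega
      subst this; exact hi

lemma bsearch_spec (n : Int) (s pref : List Int)
    (hpref : ∀ i, i < s.length → pref.getD i 0 = (s.take i).sum)
    (hmono : ∀ i j : Nat, stopAt n s i → i ≤ j → j < s.length → stopAt n s j) :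
    ∀ (k lo hi : Nat), hi - lo = k → lo ≤ hi → hi ≤ s.length →
    (∀ i, i < lo → ¬ stopAt n s i) → (∀ i, hi ≤ i → i < s.length → stopAt n s i) →
    (∀ i, i < bsearchLoop n s pref lo hi → ¬ stopAt n s i) ∧
    (bsearchLoop n s pref lo hi < s.length → stopAt n s (bsearchLoop n s pref lo hi)) ∧
    bsearchLoop n s pref lo hi ≤ s.length := by
  intro k
  induction k using Nat.strong_induction_on with
  | _ k IH =>
    intro lo hi hk hle hhi hlo hup
    rw [bsearchLoop]
    by_cases h : lo < hi
    · rw [dif_pos h]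
      have hmidlt : (lo + hi) / 2 < hi := by omega
      have hmidge : lo ≤ (lo + hi) / 2 := by omega
      have hmidlen : (lo + hi) / 2 < s.length := by omega
      by_cases hc : s.getD ((lo + hi) / 2) 0 + (((lo + hi) / 2 : Nat) : Int) + pref.getD ((lo + hi) / 2) 0 ≥ n - 1
      · rw [if_pos hc]
        have hstop : stopAt n s ((lo + hi) / 2) := by
          unfold stopAt; rwa [hpref _ hmidlen] at hc
        exact IH ((lo + hi) / 2 - lo) (by omega) lo ((lo + hi) / 2) rfl hmidge (by omega)
          hlo (fun i h1 h2 => hmono _ _ hstop h1 h2)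
      · rw [if_neg hc]
        have hnstop : ¬ stopAt n s ((lo + hi) / 2) := by
          unfold stopAt; rwa [hpref _ hmidlen] at hc
        refine IH (hi - ((lo + hi) / 2 + 1)) (by omega) ((lo + hi) / 2 + 1) hi rfl (by omega) hhi
          (fun i hi2 => ?_) hup
        intro hsi
        rcases Nat.lt_or_ge i lo with h3 | h3
        · exact hlo i h3 hsi
        · exact hnstop (hmono i _ hsi (by omega) hmidlen)
    · rw [dif_neg h]
      have heq : lo = hi := by omega
      exact ⟨hlo, fun hl => hup lo (by omega) hl, by omega⟩

lemma loop_char (n : Int) (s : List Int) (r : Nat)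
    (hr : r ≤ s.length)
    (hfirst : ∀ i, i < r → ¬ stopAt n s i)
    (hpr : r < s.length → stopAt n s r) :
    ∀ (k i : Nat), r - i = k → i ≤ r →
    solutionLoop (n - (s.take i).sum - i) ((s.take i).sum) (s.drop i)
      = if r = s.length then 0 else n - (r : Int) - 1 := by
  intro k
  induction k with
  | zero =>
    intro i hk hir
    have hieq : i = r := by omega
    subst hieq
    by_cases hl : i = s.length
    · rw [if_pos hl, hl, List.drop_length]
      rfl
    · have hlen : i < s.length := by omega
      have hst := hpr hlen
      unfold stopAt at hst
      rw [getD_eq_getElem s i hlen] at hst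
      rw [if_neg hl, List.drop_eq_getElem_cons hlen]
      by_cases heq : s[i] = (n - (s.take i).sum - i) - 1
      · simp only [solutionLoop]
        rw [if_pos heq, heq]
        ring
      · have hgt : s[i] > (n - (s.take i).sum - i) - 1 := by
          push_cast at hst heq ⊢; omega
        simp only [solutionLoop]
        rw [if_neg heq, if_pos hgt]
        ring
  | succ m ihm =>
    intro i hk hir
    have hlen : i < s.length := by omega
    have hnst := hfirst i (by omega)
    unfold stopAt at hnst
    rw [getD_eq_getElem s i hlen] at hnst
    push_neg at hnst
    rw [List.drop_eq_getElem_cons hlen]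
    have hne : ¬ (s[i] = (n - (s.take i).sum - i) - 1) := by omega
    have hng : ¬ (s[i] > (n - (s.take i).sum - i) - 1) := by omega
    simp only [solutionLoop]
    rw [if_neg hne, if_neg hng]
    have hstep := ihm (i + 1) (by omega) (by omega)
    rw [sum_take_succ_getD s i hlen, getD_eq_getElem s i hlen] at hstep
    have e1 : n - ((s.take i).sum + s[i]) - ((i : Int) + 1) = n - (s.take i).sum - (i : Int) - (s[i] + 1) := by
      ring
    rw [show ((i + 1 : Nat) : Int) = (i : Int) + 1 by push_cast; ring, e1] at hstep
    exact hstep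

-- ===== VERDICT (by name: the statement is the Claim_ definition above) =====
theorem solution_spec : Claim_equal_solution := by
  intro n chains _hdom hpre
  unfold Spec_solution solution solution_alt
  set s := PySem.List.sorted chains (fun x => x) false with hs
  have hnn : ∀ c ∈ s, 0 ≤ c := by
    intro c hc
    exact hpre c ((PySem.List.mem_sorted chains (fun x => x) false c).mp hc)
  have hmono := stop_mono n s hnn
  have hpref := fun i hi => prefTable_getD s i hi
  obtain ⟨h1, h2, h3⟩ := bsearch_spec n s (prefTable s) hpref hmono (s.length - 0) 0 s.length rfl
    (by omega) le_rfl (by omega) (by intro i h4 h5; omega)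
  have hmain := loop_char n s (bsearchLoop n s (prefTable s) 0 s.length) h3 h1 h2
    (bsearchLoop n s (prefTable s) 0 s.length) 0 rfl (by omega)
  simpa using hmain
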